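-- pv_equiv track=rewrite | github.com/star9988rr/VIPScene | external_scripts/grounded_sam/run_grounded_sam.py | generate_substrings
-- ===== SOURCE A (Python) =====
-- def generate_substrings(input_string):
--     input_list = input_string.split()
--     result = []
--     n = len(input_list)
--     for i in range(n):
--         for j in range(i, n):
--             result.append(' '.join(input_list[i:j+1]))
--     return result
-- ===== SOURCE B (Python) =====
-- def generate_substrings(input_string):
--     words = input_string.split()
--     result = []
--     while words:
--         current = words[0]
--         result.append(current)
--         for w in words[1:]:
--             current = current + ' ' + w
--             result.append(current)
--         words = words[1:]
--     return result
-- ===== Notes on version B (the rewrite author's own statement) =====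
-- stated objective: alternative
-- what changed: B grows each substring incrementally with a running string accumulator while walking down the suffixes, instead of A's fresh slice-and-join of the word list for every (i,j) pair.
import Mathlib
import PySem

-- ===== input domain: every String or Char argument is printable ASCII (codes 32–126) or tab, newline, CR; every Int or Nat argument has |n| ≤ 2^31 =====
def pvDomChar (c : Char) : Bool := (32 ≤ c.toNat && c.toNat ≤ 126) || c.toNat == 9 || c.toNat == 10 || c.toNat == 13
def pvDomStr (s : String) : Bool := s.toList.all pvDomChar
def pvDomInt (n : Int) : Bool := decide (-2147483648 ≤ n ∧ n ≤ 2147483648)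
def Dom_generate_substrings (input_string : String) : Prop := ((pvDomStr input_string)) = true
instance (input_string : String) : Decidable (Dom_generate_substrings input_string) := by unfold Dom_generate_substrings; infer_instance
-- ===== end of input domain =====

-- B builds each word-substring by growing a running string (one concatenation per output),
-- instead of A's fresh slice-and-join of the word list for every (i, j) pair.

-- ===== PORT A =====
def generate_substrings (input_string : String) : List String :=
  let input_list := PySem.Str.split₀ input_string
  let n : Int := input_list.length
  (PySem.List.pyRange 0 n 1).foldl (fun result i =>
    (PySem.List.pyRange i n 1).foldl (fun result j =>
      result ++ [PySem.Str.join " " (PySem.List.slice input_list (some i) (some (j + 1)))]) result) []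

-- ===== PORT B =====
-- inner 'for w in words[1:]': current = current + ' ' + w  (written as ' '.join([current, w]), the same string)
def gsGrow : List String → String → List String → List String
  | [], _, acc => acc
  | w :: rest, cur, acc =>
      let cur' := PySem.Str.join " " [cur, w]
      gsGrow rest cur' (acc ++ [cur'])

-- outer 'while words: …; words = words[1:]'
def gsOuter : List String → List String → List String
  | [], acc => acc
  | w :: rest, acc => gsOuter rest (gsGrow rest w (acc ++ [w]))

def generate_substrings_alt (input_string : String) : List String :=
  gsOuter (PySem.Str.split₀ input_string) []

-- ===== PRECONDITION & SPEC =====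
def Spec_generate_substrings (input_string : String) (out : List String) : Prop := out = generate_substrings_alt input_string
instance (input_string : String) (out : List String) : Decidable (Spec_generate_substrings input_string out) := by unfold Spec_generate_substrings; infer_instance

-- ===== CLAIM (what is proved, stated in full; the proofs are below) =====
def Claim_equal_generate_substrings : Prop := ∀ (input_string : String), Dom_generate_substrings input_string → Spec_generate_substrings input_string (generate_substrings input_string)

-- ===== LEMMAS AND PROOFS =====

-- canonical form: for each suffix w :: rest, the joins of its nonempty prefixes
def gsCanon : List String → List String
  | [] => []
  | w :: rest =>
      (w :: (List.range rest.length).map (fun k => PySem.Str.join " " (w :: rest.take (k + 1))))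
        ++ gsCanon rest

theorem chars_join_join (sp a b : List Char) (l : List (List Char)) :
    PySem.Chars.join sp (PySem.Chars.join sp [a, b] :: l) = PySem.Chars.join sp (a :: b :: l) := by
  cases l with
  | nil =>
      rw [PySem.Chars.join_singleton, PySem.Chars.join_cons_cons, PySem.Chars.join_singleton]
  | cons x xs =>
      simp [PySem.Chars.join_cons_cons, PySem.Chars.join_singleton, List.append_assoc]

theorem join_join_two (c w : String) (l : List String) :
    PySem.Str.join " " (PySem.Str.join " " [c, w] :: l) = PySem.Str.join " " (c :: w :: l) := by
  simp only [PySem.Str.join, List.map_cons, List.map_nil, String.toList_ofList]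
  rw [chars_join_join]

theorem gsGrow_eq (rest : List String) : ∀ (cur : String) (acc : List String),
    gsGrow rest cur acc =
      acc ++ (List.range rest.length).map (fun k => PySem.Str.join " " (cur :: rest.take (k + 1))) := by
  induction rest with
  | nil => intro cur acc; simp [gsGrow]
  | cons w r ih =>
      intro cur acc
      simp only [gsGrow, ih, List.length_cons]
      rw [List.range_succ_eq_map]
      simp [join_join_two, List.append_assoc, Function.comp]

theorem gsOuter_eq (ws : List String) : ∀ (acc : List String),
    gsOuter ws acc = acc ++ gsCanon ws := by
  induction ws with
  | nil => intro acc; simp [gsOuter, gsCanon]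
  | cons w rest ih =>
      intro acc
      simp only [gsOuter, gsCanon, ih, gsGrow_eq]
      simp [List.append_assoc]

theorem canon_eq_flatMap (ws : List String) :
    (List.range ws.length).flatMap
      (fun i => (List.range (ws.length - i)).map
        (fun k => PySem.Str.join " " ((ws.drop i).take (k + 1)))) = gsCanon ws := by
  induction ws with
  | nil => simp [gsCanon]
  | cons w rest ih =>
      rw [List.length_cons, List.range_succ_eq_map, List.flatMap_cons, List.flatMap_map]
      simp only [Nat.sub_zero, List.drop_zero, Nat.succ_sub_succ, List.drop_succ_cons]
      rw [List.range_succ_eq_map]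
      simp only [List.map_cons, List.take_succ_cons, List.map_map]
      rw [gsCanon, ih]
      simp [Function.comp_def, PySem.Str.join, PySem.Chars.join_singleton]

theorem portA_eq_canon (s : String) : generate_substrings s = gsCanon (PySem.Str.split₀ s) := by
  classical
  unfold generate_substrings
  set ws := PySem.Str.split₀ s with hws
  simp only [PySem.List.foldl_append_singleton_eq_map]
  have h1 : ∀ (init : List String),
      (PySem.List.pyRange 0 (ws.length : Int) 1).foldl
        (fun result i => result ++ (PySem.List.pyRange i (ws.length : Int) 1).map
          (fun j => PySem.Str.join " " (PySem.List.slice ws (some i) (some (j + 1))))) init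
      = init ++ (PySem.List.pyRange 0 (ws.length : Int) 1).flatMap
          (fun i => (PySem.List.pyRange i (ws.length : Int) 1).map
            (fun j => PySem.Str.join " " (PySem.List.slice ws (some i) (some (j + 1))))) := by
    intro init
    exact PySem.List.foldl_append_eq_flatMap _ _ init
  rw [h1, List.nil_append, ← canon_eq_flatMap ws]
  rw [PySem.List.pyRange_zero_natCast, List.flatMap_map]
  apply List.flatMap_congr
  intro a _
  rw [PySem.List.pyRange_one, List.map_map]
  have hlen : (((ws.length : Int)) - (a : Int)).toNat = ws.length - a := by omega
  rw [hlen]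
  apply List.map_congr_left
  intro k _
  have hidx : ((a : Int) + (k : Int)) + 1 = (a : Int) + ((k + 1 : Nat) : Int) := by push_cast; ring
  simp only [Function.comp]
  rw [hidx, PySem.List.slice_natCast_add]

theorem portB_eq_canon (s : String) : generate_substrings_alt s = gsCanon (PySem.Str.split₀ s) := by
  unfold generate_substrings_alt
  rw [gsOuter_eq, List.nil_append]

-- ===== VERDICT (by name: the statement is the Claim_ definition above) =====
theorem generate_substrings_spec : Claim_equal_generate_substrings := by
  intro s _
  unfold Spec_generate_substrings
  rw [portA_eq_canon, portB_eq_canon]
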